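-- pv_equiv track=rewrite | github.com/alpsmgadriano-ALPS/DimensionamentoSolar | app.py | calcular_arranjo_otimizado
-- ===== SOURCE A (Python) =====
-- import math
--
-- def calcular_arranjo_otimizado(potencia_necessaria_watts, tensao_sistema, placa_selecionada):
--     if tensao_sistema == "220V":
--         min_por_string, max_por_string = 7, 9
--     else:
--         min_por_string, max_por_string = 13, 15
--
--     placas_minimas_potencia = math.ceil(potencia_necessaria_watts / placa_selecionada['P_max'])
--     melhor_arranjo = None
--     menor_sobra_placas = 9999
--
--     for num_strings in range(1, 301):
--         total_min_tensao = num_strings * min_por_string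
--         total_max_tensao = num_strings * max_por_string
--         total_placas_alvo = max(placas_minimas_potencia, total_min_tensao)
--
--         if total_placas_alvo <= total_max_tensao:
--             placas_por_string = math.ceil(total_placas_alvo / num_strings)
--             total_real = placas_por_string * num_strings
--
--             if placas_por_string <= max_por_string:
--                 sobra = total_real - placas_minimas_potencia
--                 if sobra < menor_sobra_placas:
--                     menor_sobra_placas = sobra
--                     melhor_arranjo = {
--                         'strings': num_strings,
--                         'placas_por_string': placas_por_string,
--                         'total_placas': total_real
--                     }
--                     if sobra == 0: break
--     return melhor_arranjo
-- ===== SOURCE B (Python) =====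
-- import math
--
-- def calcular_arranjo_otimizado(potencia_necessaria_watts, tensao_sistema, placa_selecionada):
--     # Instead of scanning all 300 string counts, try only the 3 possible per-string
--     # panel counts p and derive the candidate string count s = ceil(pm/p) directly.
--     if tensao_sistema == "220V":
--         min_s, max_s = 7, 9
--     else:
--         min_s, max_s = 13, 15
--     pm = math.ceil(potencia_necessaria_watts / placa_selecionada['P_max'])
--     candidates = []
--     for p in range(min_s, max_s + 1):
--         s = max(1, -(-pm // p))
--         if s > 300:
--             continue
--         pps = max(min_s, -(-max(pm, s * min_s) // s))
--         sobra = pps * s - pm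
--         if sobra < 9999:  # same surplus cap A imposes via its sentinel
--             candidates.append((sobra, s, pps))
--     if not candidates:
--         return None
--     sobra, s, pps = min(candidates)
--     return {'strings': s, 'placas_por_string': pps, 'total_placas': pps * s}
-- ===== Notes on version B (the rewrite author's own statement) =====
-- stated objective: faster
-- what changed: A scans all 300 possible string counts tracking the best surplus; B tries only the 3 admissible per-string panel counts p, derives the candidate string count ceil(placas_minimas/p) for each, and takes the lexicographic minimum of (surplus, strings) over these at most 3 candidates (keeping A's surplus cap of 9999).
import Mathlib
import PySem

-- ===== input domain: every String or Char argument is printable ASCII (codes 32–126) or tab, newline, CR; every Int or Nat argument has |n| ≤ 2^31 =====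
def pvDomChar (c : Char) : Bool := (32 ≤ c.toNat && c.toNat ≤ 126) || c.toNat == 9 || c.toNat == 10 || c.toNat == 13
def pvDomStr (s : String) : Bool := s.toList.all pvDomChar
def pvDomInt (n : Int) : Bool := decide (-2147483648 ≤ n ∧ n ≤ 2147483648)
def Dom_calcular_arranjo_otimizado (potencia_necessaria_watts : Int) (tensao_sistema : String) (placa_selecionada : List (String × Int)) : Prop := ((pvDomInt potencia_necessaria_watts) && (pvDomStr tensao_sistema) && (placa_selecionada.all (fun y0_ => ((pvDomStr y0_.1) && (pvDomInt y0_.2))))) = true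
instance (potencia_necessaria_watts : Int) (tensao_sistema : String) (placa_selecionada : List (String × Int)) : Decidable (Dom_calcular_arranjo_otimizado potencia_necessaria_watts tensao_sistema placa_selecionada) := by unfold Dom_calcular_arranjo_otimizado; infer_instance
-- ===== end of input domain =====

-- B replaces A's scan over all 300 string counts by trying only the 3 per-string panel
-- counts and deriving each candidate string count directly (simpler/alternative search).


-- ===== PORT A =====
-- math.ceil(a / b): exact integer ceiling; equal to Python's float path on the Dom-bounded
-- inputs (|a| ≤ 2^31, so the double quotient never rounds across an integer).
def pvCeil (a b : Int) : Int := -(PySem.Int.floordiv (-a) b)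

-- the 'for num_strings in range(1, 301)' loop of A, with its break, as fuel recursion;
-- state = (num_strings, melhor_arranjo, menor_sobra_placas)
def pvLoopA (m M pm : Int) : Nat → Int → Option (List (String × Int)) → Int → Option (List (String × Int))
  | 0, _, melhor, _ => melhor
  | fuel + 1, s, melhor, menor =>
    let total_min := s * m
    let total_max := s * M
    let alvo := max pm total_min
    if alvo ≤ total_max then
      let pps := pvCeil alvo s
      let total := pps * s
      if pps ≤ M then
        let sobra := total - pm
        if sobra < menor then
          let melhor' : Option (List (String × Int)) :=
            some [("strings", s), ("placas_por_string", pps), ("total_placas", total)]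
          if sobra = 0 then melhor'
          else pvLoopA m M pm fuel (s + 1) melhor' sobra
        else pvLoopA m M pm fuel (s + 1) melhor menor
      else pvLoopA m M pm fuel (s + 1) melhor menor
    else pvLoopA m M pm fuel (s + 1) melhor menor

def calcular_arranjo_otimizado (potencia_necessaria_watts : Int) (tensao_sistema : String) (placa_selecionada : List (String × Int)) : Option (List (String × Int)) :=
  let mm : Int × Int := if tensao_sistema == "220V" then (7, 9) else (13, 15)
  match (PySem.Dict.mk placa_selecionada).get? "P_max" with
  | none => none      -- KeyError (outside Pre_)
  | some pmax =>
    if pmax = 0 then none   -- ZeroDivisionError (outside Pre_)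
    else pvLoopA mm.1 mm.2 (pvCeil potencia_necessaria_watts pmax) 300 1 none 9999

-- ===== PORT B =====
-- the candidate-collecting loop of Source B over the 3 per-string panel counts
def pvCand (m M pm : Int) (ps : List Int) : List (Int × Int × Int) :=
  ps.foldl (fun acc p =>
    let s := max 1 (pvCeil pm p)
    if s > 300 then acc
    else
      let pps := max m (pvCeil (max pm (s * m)) s)
      let sobra := pps * s - pm
      if sobra < 9999 then acc ++ [(sobra, s, pps)] else acc) []

-- Python's min() on a list of int triples: lexicographic, first minimal element
def pvMinLex : List (Int × Int × Int) → Option (Int × Int × Int)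
  | [] => none
  | t :: ts => some (ts.foldl (fun b c =>
      if c.1 < b.1 ∨ (c.1 = b.1 ∧ (c.2.1 < b.2.1 ∨ (c.2.1 = b.2.1 ∧ c.2.2 < b.2.2))) then c else b) t)

def calcular_arranjo_otimizado_alt (potencia_necessaria_watts : Int) (tensao_sistema : String) (placa_selecionada : List (String × Int)) : Option (List (String × Int)) :=
  let mm : Int × Int := if tensao_sistema == "220V" then (7, 9) else (13, 15)
  match (PySem.Dict.mk placa_selecionada).get? "P_max" with
  | none => none
  | some pmax =>
    if pmax = 0 then none
    else
      let pm := pvCeil potencia_necessaria_watts pmax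
      match pvMinLex (pvCand mm.1 mm.2 pm (PySem.List.pyRange mm.1 (mm.2 + 1) 1)) with
      | none => none
      | some (_, s, pps) =>
        some [("strings", s), ("placas_por_string", pps), ("total_placas", pps * s)]

-- ===== PRECONDITION & SPEC =====
-- A raises KeyError when 'P_max' is absent and ZeroDivisionError when it is 0; Pre_ excludes exactly those.
def Pre_calcular_arranjo_otimizado (potencia_necessaria_watts : Int) (tensao_sistema : String) (placa_selecionada : List (String × Int)) : Prop :=
  ∃ v, (PySem.Dict.mk placa_selecionada).get? "P_max" = some v ∧ v ≠ 0
instance (potencia_necessaria_watts : Int) (tensao_sistema : String) (placa_selecionada : List (String × Int)) : Decidable (Pre_calcular_arranjo_otimizado potencia_necessaria_watts tensao_sistema placa_selecionada) := by unfold Pre_calcular_arranjo_otimizado; infer_instance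

def pvWitness_calcular_arranjo_otimizado : Int × String × (List (String × Int)) := (3000, "220V", [("P_max", 550)])

def Spec_calcular_arranjo_otimizado (potencia_necessaria_watts : Int) (tensao_sistema : String) (placa_selecionada : List (String × Int)) (out : Option (List (String × Int))) : Prop := out = calcular_arranjo_otimizado_alt potencia_necessaria_watts tensao_sistema placa_selecionada
instance (potencia_necessaria_watts : Int) (tensao_sistema : String) (placa_selecionada : List (String × Int)) (out : Option (List (String × Int))) : Decidable (Spec_calcular_arranjo_otimizado potencia_necessaria_watts tensao_sistema placa_selecionada out) := by unfold Spec_calcular_arranjo_otimizado; infer_instance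

-- ===== CLAIM (what is proved, stated in full; the proofs are below) =====
def Claim_equal_calcular_arranjo_otimizado : Prop := ∀ (potencia_necessaria_watts : Int) (tensao_sistema : String) (placa_selecionada : List (String × Int)), Dom_calcular_arranjo_otimizado potencia_necessaria_watts tensao_sistema placa_selecionada → Pre_calcular_arranjo_otimizado potencia_necessaria_watts tensao_sistema placa_selecionada → Spec_calcular_arranjo_otimizado potencia_necessaria_watts tensao_sistema placa_selecionada (calcular_arranjo_otimizado potencia_necessaria_watts tensao_sistema placa_selecionada)

-- ===== LEMMAS AND PROOFS =====

-- ceiling-division brackets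
theorem pvCeil_le_iff (a b q : Int) (hb : 0 < b) : pvCeil a b ≤ q ↔ a ≤ q * b := by
  unfold pvCeil
  constructor
  · intro h
    have h2 := (PySem.Int.le_floordiv_iff_mul_le (a := -a) (b := b) (q := -q) hb).mpr
    by_contra hc
    rw [not_le] at hc
    have : ¬ (-q ≤ PySem.Int.floordiv (-a) b) := by
      intro hle
      have := (PySem.Int.le_floordiv_iff_mul_le (a := -a) (b := b) (q := -q) hb).mp hle
      nlinarith
    omega
  · intro h
    have : (-q) * b ≤ -a := by nlinarith
    have := (PySem.Int.le_floordiv_iff_mul_le (a := -a) (b := b) (q := -q) hb).mpr this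
    omega

theorem lt_pvCeil_iff (a b q : Int) (hb : 0 < b) : q < pvCeil a b ↔ q * b < a := by
  constructor
  · intro h
    by_contra hc
    rw [not_lt] at hc
    have := (pvCeil_le_iff a b q hb).mpr hc
    omega
  · intro h
    by_contra hc
    rw [not_lt] at hc
    have := (pvCeil_le_iff a b q hb).mp hc
    omega

theorem le_mul_pvCeil (a b : Int) (hb : 0 < b) : a ≤ pvCeil a b * b :=
  (pvCeil_le_iff a b (pvCeil a b) hb).mp le_rfl

theorem pvCeil_mul_self (m s : Int) (hs : 0 < s) : pvCeil (s * m) s = m := by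
  have h1 : pvCeil (s * m) s ≤ m := (pvCeil_le_iff _ _ _ hs).mpr (le_of_eq (mul_comm s m))
  have h2 : m - 1 < pvCeil (s * m) s := (lt_pvCeil_iff _ _ _ hs).mpr (by nlinarith)
  omega

-- proof-side abbreviations for the common quantities of both ports
def pvP (m pm s : Int) : Int := max m (pvCeil pm s)
def pvSig (m pm s : Int) : Int := pvP m pm s * s - pm
def pvV (m M pm t : Int) : Prop := 1 ≤ t ∧ t ≤ 300 ∧ pm ≤ t * M ∧ pvSig m pm t < 9999
def pvDict (m pm w : Int) : Option (List (String × Int)) :=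
  some [("strings", w), ("placas_por_string", pvP m pm w), ("total_placas", pvP m pm w * w)]
def pvLeK (m pm w t : Int) : Prop :=
  pvSig m pm w < pvSig m pm t ∨ (pvSig m pm w = pvSig m pm t ∧ w ≤ t)
def pvLt3 (c b : Int × Int × Int) : Prop :=
  c.1 < b.1 ∨ (c.1 = b.1 ∧ (c.2.1 < b.2.1 ∨ (c.2.1 = b.2.1 ∧ c.2.2 < b.2.2)))

-- both ports' placas_por_string formula is pvP
theorem pps_eq (m pm s : Int) (hs : 0 < s) :
    pvCeil (max pm (s * m)) s = pvP m pm s := by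
  unfold pvP
  rcases le_or_gt pm (s * m) with h | h
  · rw [max_eq_right h, pvCeil_mul_self m s hs]
    have : pvCeil pm s ≤ m := (pvCeil_le_iff _ _ _ hs).mpr (by nlinarith)
    omega
  · rw [max_eq_left h.le]
    have : m < pvCeil pm s := (lt_pvCeil_iff _ _ _ hs).mpr (by nlinarith)
    omega

theorem pvSig_nonneg (m pm s : Int) (hm : 0 < m) (hs : 1 ≤ s) : 0 ≤ pvSig m pm s := by
  unfold pvSig pvP
  have h1 : pm ≤ pvCeil pm s * s := le_mul_pvCeil pm s (by omega)
  rcases le_or_gt m (pvCeil pm s) with h | h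
  · rw [max_eq_right h]; omega
  · rw [max_eq_left h.le]; nlinarith

def pvG (m pm : Int) (p : Int) : Option (Int × Int × Int) :=
  let s := max 1 (pvCeil pm p)
  if s ≤ 300 ∧ pvSig m pm s < 9999 then some (pvSig m pm s, s, pvP m pm s) else none

theorem cand_step (m pm : Int) (acc : List (Int × Int × Int)) (p : Int) :
    (let s := max 1 (pvCeil pm p);
     if s > 300 then acc
     else
       let pps := max m (pvCeil (max pm (s * m)) s)
       let sobra := pps * s - pm
       if sobra < 9999 then acc ++ [(sobra, s, pps)] else acc)
    = acc ++ (pvG m pm p).toList := by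
  have hs : 0 < max 1 (pvCeil pm p) := by omega
  have hpps : max m (pvCeil (max pm (max 1 (pvCeil pm p) * m)) (max 1 (pvCeil pm p)))
      = pvP m pm (max 1 (pvCeil pm p)) := by
    rw [pps_eq m pm _ hs]; unfold pvP; omega
  simp only [pvG, hpps]
  split_ifs with h1 h2 h3 h4 h5 <;>
    first
      | omega
      | (exfalso; unfold pvSig at h2 ⊢; omega)
      | (exfalso; unfold pvSig at h3 ⊢; omega)
      | (exfalso; unfold pvSig at h4; omega)
      | (exfalso; unfold pvSig at h5; omega)
      | (simp <;> (unfold pvSig; omega))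

theorem cand_eq (m pm : Int) (ps : List Int) (acc : List (Int × Int × Int)) :
    ps.foldl (fun acc p =>
      let s := max 1 (pvCeil pm p)
      if s > 300 then acc
      else
        let pps := max m (pvCeil (max pm (s * m)) s)
        let sobra := pps * s - pm
        if sobra < 9999 then acc ++ [(sobra, s, pps)] else acc) acc
    = acc ++ ps.filterMap (pvG m pm) := by
  induction ps generalizing acc with
  | nil => simp
  | cons p ps ih =>
    rw [List.foldl_cons]
    have hstep := cand_step m pm acc p
    simp only [] at hstep
    rw [hstep, ih, List.filterMap_cons]
    cases pvG m pm p <;> simp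

theorem minLex_aux (ts : List (Int × Int × Int)) : ∀ b,
    ((ts.foldl (fun b c =>
      if c.1 < b.1 ∨ (c.1 = b.1 ∧ (c.2.1 < b.2.1 ∨ (c.2.1 = b.2.1 ∧ c.2.2 < b.2.2))) then c else b) b) = b ∨
     (ts.foldl (fun b c =>
      if c.1 < b.1 ∨ (c.1 = b.1 ∧ (c.2.1 < b.2.1 ∨ (c.2.1 = b.2.1 ∧ c.2.2 < b.2.2))) then c else b) b) ∈ ts) ∧
    ¬ pvLt3 b (ts.foldl (fun b c =>
      if c.1 < b.1 ∨ (c.1 = b.1 ∧ (c.2.1 < b.2.1 ∨ (c.2.1 = b.2.1 ∧ c.2.2 < b.2.2))) then c else b) b) ∧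
    ∀ x ∈ ts, ¬ pvLt3 x (ts.foldl (fun b c =>
      if c.1 < b.1 ∨ (c.1 = b.1 ∧ (c.2.1 < b.2.1 ∨ (c.2.1 = b.2.1 ∧ c.2.2 < b.2.2))) then c else b) b) := by
  induction ts with
  | nil =>
    intro b
    refine ⟨Or.inl rfl, ?_, by simp⟩
    simp only [List.foldl_nil]
    unfold pvLt3; omega
  | cons c ts ih =>
    intro b
    simp only [List.foldl_cons]
    by_cases h : c.1 < b.1 ∨ (c.1 = b.1 ∧ (c.2.1 < b.2.1 ∨ (c.2.1 = b.2.1 ∧ c.2.2 < b.2.2)))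
    · simp only [if_pos h]
      obtain ⟨hmem, hb, hall⟩ := ih c
      refine ⟨by rcases hmem with h' | h' <;> simp [h'], ?_, ?_⟩
      · intro hlt
        exact hb (by unfold pvLt3 at hb hlt ⊢; omega)
      · intro x hx
        rw [List.mem_cons] at hx
        rcases hx with hx | hx
        · subst hx; exact hb
        · exact hall x hx
    · simp only [if_neg h]
      obtain ⟨hmem, hb, hall⟩ := ih b
      refine ⟨by rcases hmem with h' | h' <;> simp [h'], hb, ?_⟩
      intro x hx
      rw [List.mem_cons] at hx
      rcases hx with hx | hx
      · subst hx
        intro hlt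
        exact hb (by unfold pvLt3 at hb hlt ⊢; omega)
      · exact hall x hx

theorem minLex_spec (l : List (Int × Int × Int)) (c : Int × Int × Int) (h : pvMinLex l = some c) :
    c ∈ l ∧ ∀ x ∈ l, ¬ pvLt3 x c := by
  match l with
  | [] => simp [pvMinLex] at h
  | t :: ts =>
    unfold pvMinLex at h
    obtain ⟨hmem, hb, hall⟩ := minLex_aux ts t
    have hc : c = ts.foldl (fun b c =>
      if c.1 < b.1 ∨ (c.1 = b.1 ∧ (c.2.1 < b.2.1 ∨ (c.2.1 = b.2.1 ∧ c.2.2 < b.2.2))) then c else b) t := by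
      simpa using h.symm
    subst hc
    refine ⟨?_, ?_⟩
    · rcases hmem with h' | h' <;> simp [h']
    · intro x hx
      rw [List.mem_cons] at hx
      rcases hx with hx | hx
      · subst hx; exact hb
      · exact hall x hx

theorem cand_valid (m M pm p : Int) (hm : 0 < m) (hp : m ≤ p) (hpM : p < M + 1)
    (hg : max 1 (pvCeil pm p) ≤ 300) (hσ : pvSig m pm (max 1 (pvCeil pm p)) < 9999) :
    pvV m M pm (max 1 (pvCeil pm p)) := by
  have hp0 : 0 < p := by omega
  have h1 : pm ≤ pvCeil pm p * p := le_mul_pvCeil pm p hp0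
  have h2 : pvCeil pm p * p ≤ max 1 (pvCeil pm p) * p := by
    have := le_max_right 1 (pvCeil pm p)
    nlinarith
  have h3 : max 1 (pvCeil pm p) * p ≤ max 1 (pvCeil pm p) * M := by
    have : (0:Int) < max 1 (pvCeil pm p) := by omega
    nlinarith
  exact ⟨by omega, hg, by omega, hσ⟩

theorem dominance (m M pm s : Int) (hm : 0 < m) (hmM : m ≤ M) (hv : pvV m M pm s) :
    m ≤ pvP m pm s ∧ pvP m pm s < M + 1 ∧
    max 1 (pvCeil pm (pvP m pm s)) ≤ 300 ∧
    pvSig m pm (max 1 (pvCeil pm (pvP m pm s))) ≤ pvSig m pm s ∧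
    max 1 (pvCeil pm (pvP m pm s)) ≤ s := by
  obtain ⟨hs1, hs300, hsM, hs9⟩ := hv
  have hs0 : (0:Int) < s := by omega
  set p := pvP m pm s with hp
  have hpm : m ≤ p := le_max_left _ _
  have hp0 : (0:Int) < p := by omega
  have hceilM : pvCeil pm s ≤ M := (pvCeil_le_iff _ _ _ hs0).mpr (by nlinarith)
  have hpM : p ≤ M := by rw [hp]; unfold pvP; omega
  -- s_p ≤ s
  have hsp_le : max 1 (pvCeil pm p) ≤ s := by
    have hceil_le : pvCeil pm s ≤ p := le_max_right _ _
    have h1 : pm ≤ pvCeil pm s * s := le_mul_pvCeil pm s hs0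
    have h2 : pm ≤ p * s := by nlinarith
    have := (pvCeil_le_iff pm p s hp0).mpr (by nlinarith)
    omega
  set sp := max 1 (pvCeil pm p) with hsp
  have hsp1 : (1:Int) ≤ sp := le_max_left _ _
  -- σ sp ≤ σ s  i.e.  pvP sp * sp ≤ p * s
  have hkey : pvP m pm sp * sp ≤ p * s := by
    have hsp0 : (0:Int) < sp := by omega
    have hcsp : pvCeil pm sp ≤ p := by
      have h1 : pm ≤ pvCeil pm p * p := le_mul_pvCeil pm p hp0
      have h2 : pvCeil pm p ≤ sp := le_max_right _ _
      exact (pvCeil_le_iff _ _ _ hsp0).mpr (by nlinarith)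
    unfold pvP
    rcases le_or_gt (pvCeil pm sp) m with h | h
    · rw [max_eq_left h]
      have : pvP m pm s * s - pm = pvSig m pm s := rfl
      have hms : m * sp ≤ m * s := by nlinarith
      have : m ≤ p := hpm
      nlinarith
    · rw [max_eq_right h.le]
      nlinarith
  refine ⟨hpm, by omega, by omega, ?_, hsp_le⟩
  unfold pvSig
  have : pvP m pm s * s = p * s := by rw [hp]
  omega

theorem menor_le (m M pm : Int) (s : Int) (melhor : Option (List (String × Int))) (menor : Int)
    (hinv : (melhor = none ∧ menor = 9999 ∧ ∀ t, 1 ≤ t → t < s → ¬ pvV m M pm t) ∨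
     (∃ w, pvV m M pm w ∧ w < s ∧ melhor = pvDict m pm w ∧ menor = pvSig m pm w ∧
        ∀ t, t < s → pvV m M pm t → pvLeK m pm w t)) : menor ≤ 9999 := by
  rcases hinv with ⟨_, h, _⟩ | ⟨w, hw, _, _, hm, _⟩
  · omega
  · have := hw.2.2.2; omega

theorem loopA_char (m M pm : Int) (hm : 0 < m) (hmM : m ≤ M) :
    ∀ (fuel : Nat) (s : Int) (melhor : Option (List (String × Int))) (menor : Int),
    1 ≤ s → s + fuel = 301 →
    ((melhor = none ∧ menor = 9999 ∧ ∀ t, 1 ≤ t → t < s → ¬ pvV m M pm t) ∨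
     (∃ w, pvV m M pm w ∧ w < s ∧ melhor = pvDict m pm w ∧ menor = pvSig m pm w ∧
        ∀ t, t < s → pvV m M pm t → pvLeK m pm w t)) →
    ((pvLoopA m M pm fuel s melhor menor = none ∧ ∀ t, ¬ pvV m M pm t) ∨
     (∃ w, pvV m M pm w ∧ (∀ t, pvV m M pm t → pvLeK m pm w t) ∧
        pvLoopA m M pm fuel s melhor menor = pvDict m pm w)) := by
  intro fuel
  induction fuel with
  | zero =>
    intro s melhor menor hs1 hfs hinv
    rcases hinv with ⟨h1, _, h3⟩ | ⟨w, hw, _, hmel, _, hleast⟩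
    · left
      exact ⟨h1 ▸ rfl, fun t ht => h3 t ht.1 (by have := ht.2.1; omega) ht⟩
    · right
      exact ⟨w, hw, fun t ht => hleast t (by have := ht.2.1; omega) ht, hmel ▸ rfl⟩
  | succ fuel ih =>
    intro s melhor menor hs1 hfs hinv
    have hs300 : s ≤ 300 := by omega
    have hs0 : (0:Int) < s := by omega
    have hmen9 := menor_le m M pm s melhor menor hinv
    simp only [pvLoopA]
    have hsmM : s * m ≤ s * M := by nlinarith
    by_cases hf : pm ≤ s * M
    · rw [if_pos (by omega : max pm (s * m) ≤ s * M)]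
      rw [pps_eq m pm s hs0]
      have hceilM : pvCeil pm s ≤ M := (pvCeil_le_iff pm s M hs0).mpr (by nlinarith)
      have hPle : pvP m pm s ≤ M := by unfold pvP; omega
      rw [if_pos hPle]
      have hsig : pvP m pm s * s - pm = pvSig m pm s := rfl
      by_cases hσ : pvP m pm s * s - pm < menor
      · rw [if_pos hσ]
        have hVs : pvV m M pm s := ⟨hs1, hs300, hf, by omega⟩
        have hleast_s : ∀ t, t < s + 1 → pvV m M pm t → pvLeK m pm s t := by
          intro t hts hVt
          rcases lt_or_ge t s with htlt | htge
          · rcases hinv with ⟨_, _, h3⟩ | ⟨w, hw, _, _, hmenw, hleast⟩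
            · exact absurd hVt (h3 t hVt.1 htlt)
            · have := hleast t htlt hVt
              unfold pvLeK at this ⊢
              omega
          · have : t = s := by omega
            subst this
            unfold pvLeK; omega
        by_cases h0 : pvP m pm s * s - pm = 0
        · rw [if_pos h0]
          right
          refine ⟨s, hVs, ?_, rfl⟩
          intro t hVt
          have hnn := pvSig_nonneg m pm t hm hVt.1
          rcases lt_or_ge t s with htlt | htge
          · exact hleast_s t (by omega) hVt
          · unfold pvLeK; omega
        · rw [if_neg h0]
          refine ih (s + 1) _ _ (by omega) (by omega) ?_
          right
          exact ⟨s, hVs, by omega, rfl, by omega, hleast_s⟩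
      · rw [if_neg hσ]
        refine ih (s + 1) _ _ (by omega) (by omega) ?_
        rcases hinv with ⟨h1, h2, h3⟩ | ⟨w, hw, hws, hmel, hmenw, hleast⟩
        · left
          refine ⟨h1, h2, ?_⟩
          intro t ht1 hts
          rcases lt_or_ge t s with htlt | htge
          · exact h3 t ht1 htlt
          · have : t = s := by omega
            subst this
            intro hVt
            have := hVt.2.2.2
            omega
        · right
          refine ⟨w, hw, by omega, hmel, hmenw, ?_⟩
          intro t hts hVt
          rcases lt_or_ge t s with htlt | htge
          · exact hleast t htlt hVt
          · have : t = s := by omega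
            subst this
            unfold pvLeK
            omega
    · rw [if_neg (by omega : ¬ max pm (s * m) ≤ s * M)]
      refine ih (s + 1) _ _ (by omega) (by omega) ?_
      rcases hinv with ⟨h1, h2, h3⟩ | ⟨w, hw, hws, hmel, hmenw, hleast⟩
      · left
        refine ⟨h1, h2, ?_⟩
        intro t ht1 hts
        rcases lt_or_ge t s with htlt | htge
        · exact h3 t ht1 htlt
        · have : t = s := by omega
          subst this
          intro hVt
          exact hf hVt.2.2.1
      · right
        refine ⟨w, hw, by omega, hmel, hmenw, ?_⟩
        intro t hts hVt
        rcases lt_or_ge t s with htlt | htge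
        · exact hleast t htlt hVt
        · have : t = s := by omega
          subst this
          exact absurd hVt.2.2.1 hf

theorem candList_eq (m M pm : Int) (ps : List Int) :
    pvCand m M pm ps = ps.filterMap (pvG m pm) := by
  unfold pvCand
  rw [cand_eq]
  simp

theorem minLex_none (l : List (Int × Int × Int)) (h : pvMinLex l = none) : l = [] := by
  cases l with
  | nil => rfl
  | cons t ts => simp [pvMinLex] at h

theorem cand_mem (m M pm p : Int) (hm : 0 < m) (hp : m ≤ p) (hpM : p < M + 1)
    (hg : max 1 (pvCeil pm p) ≤ 300) (hσ : pvSig m pm (max 1 (pvCeil pm p)) < 9999) :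
    (pvSig m pm (max 1 (pvCeil pm p)), max 1 (pvCeil pm p), pvP m pm (max 1 (pvCeil pm p)))
      ∈ (PySem.List.pyRange m (M + 1) 1).filterMap (pvG m pm) := by
  refine List.mem_filterMap.mpr ⟨p, ?_, ?_⟩
  · exact (PySem.List.mem_pyRange_one).mpr ⟨hp, hpM⟩
  · simp only [pvG]
    rw [if_pos ⟨hg, hσ⟩]

theorem core_eq (m M : Int) (hm : 0 < m) (hmM : m ≤ M) (pm : Int) :
    pvLoopA m M pm 300 1 none 9999
      = (match pvMinLex (pvCand m M pm (PySem.List.pyRange m (M + 1) 1)) with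
         | none => none
         | some (_, s, pps) =>
           some [("strings", s), ("placas_por_string", pps), ("total_placas", pps * s)]) := by
  have hchar := loopA_char m M pm hm hmM 300 1 none 9999 (by omega) (by omega)
    (Or.inl ⟨rfl, rfl, fun t h1 h2 => by omega⟩)
  rw [candList_eq]
  cases hmin : pvMinLex ((PySem.List.pyRange m (M + 1) 1).filterMap (pvG m pm)) with
  | none =>
    have hnil := minLex_none _ hmin
    rcases hchar with ⟨hnone, _⟩ | ⟨w, hVw, _, _⟩
    · exact hnone
    · obtain ⟨hd1, hd2, hd3, hd4, hd5⟩ := dominance m M pm w hm hmM hVw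
      have hσ : pvSig m pm (max 1 (pvCeil pm (pvP m pm w))) < 9999 := by
        have := hVw.2.2.2; omega
      have := cand_mem m M pm (pvP m pm w) hm hd1 hd2 hd3 hσ
      rw [hnil] at this
      simp at this
  | some c =>
    obtain ⟨hcmem, hcle⟩ := minLex_spec _ c hmin
    obtain ⟨q, hqmem, hq⟩ := List.mem_filterMap.mp hcmem
    have hqr := (PySem.List.mem_pyRange_one).mp hqmem
    simp only [pvG] at hq
    by_cases hcond : max 1 (pvCeil pm q) ≤ 300 ∧ pvSig m pm (max 1 (pvCeil pm q)) < 9999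
    swap
    · rw [if_neg hcond] at hq; exact absurd hq (by simp)
    rw [if_pos hcond] at hq
    have hceq : c = (pvSig m pm (max 1 (pvCeil pm q)), max 1 (pvCeil pm q), pvP m pm (max 1 (pvCeil pm q))) := by
      exact (Option.some_injective _ hq).symm
    have hVq : pvV m M pm (max 1 (pvCeil pm q)) :=
      cand_valid m M pm q hm hqr.1 hqr.2 hcond.1 hcond.2
    rcases hchar with ⟨_, hnoV⟩ | ⟨w, hVw, hleast, heq⟩
    · exact absurd hVq (hnoV _)
    · obtain ⟨hd1, hd2, hd3, hd4, hd5⟩ := dominance m M pm w hm hmM hVw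
      have hσp : pvSig m pm (max 1 (pvCeil pm (pvP m pm w))) < 9999 := by
        have := hVw.2.2.2; omega
      have hcpmem := cand_mem m M pm (pvP m pm w) hm hd1 hd2 hd3 hσp
      have hnlt := hcle _ hcpmem
      have hlw := hleast _ hVq
      -- conclude: the chosen candidate is exactly w
      have hw_eq : max 1 (pvCeil pm q) = w ∧
          pvSig m pm (max 1 (pvCeil pm q)) = pvSig m pm w := by
        rw [hceq] at hnlt
        unfold pvLt3 at hnlt
        unfold pvLeK at hlw
        simp only at hnlt
        omega
      rw [heq, hceq, hw_eq.1]
      rfl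

-- ===== VERDICT (by name: the statement is the Claim_ definition above) =====
theorem calcular_arranjo_otimizado_spec : Claim_equal_calcular_arranjo_otimizado := by
  intro pot tensao placa _ hpre
  obtain ⟨v, hv, hv0⟩ := hpre
  unfold Spec_calcular_arranjo_otimizado calcular_arranjo_otimizado calcular_arranjo_otimizado_alt
  rw [hv]
  simp only [if_neg hv0]
  by_cases h : tensao == "220V"
  · simp only [h, ite_true]
    exact core_eq 7 9 (by norm_num) (by norm_num) _
  · simp only [h, Bool.false_eq_true, ite_false]
    exact core_eq 13 15 (by norm_num) (by norm_num) _
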